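-- pv_equiv track=rewrite | github.com/manthanghasadiya/senshi | senshi/browser/spa_crawler.py | _is_interesting_api
-- ===== SOURCE A (Python) =====
-- def _is_interesting_api(call: dict) -> bool:
--     """Filter out noise (analytics, etc)."""
--     url = call["url"].lower()
--     noise_patterns = [
--         "google-analytics", "facebook", "twitter",
--         "hotjar", "segment", "mixpanel", "sentry",
--         ".png", ".jpg", ".css", ".woff"
--     ]
--     return not any(p in url for p in noise_patterns)
-- ===== SOURCE B (Python) =====
-- _NOISE = ("google-analytics", "facebook", "twitter",
--           "hotjar", "segment", "mixpanel", "sentry",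
--           ".png", ".jpg", ".css", ".woff")
--
--
-- def _is_interesting_api(call: dict) -> bool:
--     """Keep the call unless some noise marker starts at some position of the URL."""
--     url = call["url"].lower()
--     return all(not url.startswith(_NOISE, i) for i in range(len(url)))
-- ===== Notes on version B (the rewrite author's own statement) =====
-- stated objective: alternative
-- what changed: Replaces the pattern-major 'any(p in url)' (one full substring search per pattern) by a single position-major left-to-right scan that tests all patterns as prefixes at each position and returns False at the first hit.
import Mathlib
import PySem

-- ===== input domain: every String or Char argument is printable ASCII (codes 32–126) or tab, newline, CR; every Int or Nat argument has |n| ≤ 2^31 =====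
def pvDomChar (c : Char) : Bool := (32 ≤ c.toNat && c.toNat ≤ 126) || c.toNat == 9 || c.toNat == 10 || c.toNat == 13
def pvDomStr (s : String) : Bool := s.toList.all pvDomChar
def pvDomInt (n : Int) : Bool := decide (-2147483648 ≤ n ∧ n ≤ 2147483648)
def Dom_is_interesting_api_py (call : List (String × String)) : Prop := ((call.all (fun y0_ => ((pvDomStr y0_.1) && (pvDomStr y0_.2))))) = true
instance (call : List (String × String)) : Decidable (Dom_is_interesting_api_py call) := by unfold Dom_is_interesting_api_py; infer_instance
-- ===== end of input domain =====

-- B changes the traversal (position-major single scan instead of pattern-major substring searches); equivalence on calls that carry a "url" key.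

-- ===== PORT A =====
def noisePatternsA : List String :=
  ["google-analytics", "facebook", "twitter",
   "hotjar", "segment", "mixpanel", "sentry",
   ".png", ".jpg", ".css", ".woff"]

def is_interesting_api_py (call : List (String × String)) : Bool :=
  match (PySem.Dict.mk call).get? "url" with
  | none => false  -- KeyError in Python; excluded by Pre_
  | some u =>
    let url := PySem.Str.lower u
    !(noisePatternsA.any (fun p => PySem.Str.isIn p url))

-- ===== PORT B =====
def noisePatternsB : List (List Char) :=
  (["google-analytics", "facebook", "twitter",
    "hotjar", "segment", "mixpanel", "sentry",
    ".png", ".jpg", ".css", ".woff"]).map String.toList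

-- the nested 'for i in range(len(url)): for p in noise: if url.startswith(p, i)' loop,
-- as structural recursion over successive suffixes of the url
def scanNoise (cs : List Char) : Bool :=
  match cs with
  | [] => true
  | _ :: rest =>
    if noisePatternsB.any (fun p => p.isPrefixOf cs) then false
    else scanNoise rest

def is_interesting_api_py_alt (call : List (String × String)) : Bool :=
  match (PySem.Dict.mk call).get? "url" with
  | none => false  -- KeyError in Python; excluded by Pre_
  | some u => scanNoise (PySem.Chars.lower u.toList)

-- ===== PRECONDITION & SPEC =====
-- Pre_ excludes exactly the calls without a "url" key, on which Python A raises KeyError.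
def Pre_is_interesting_api_py (call : List (String × String)) : Prop :=
  "url" ∈ call.map Prod.fst
instance (call : List (String × String)) : Decidable (Pre_is_interesting_api_py call) := by unfold Pre_is_interesting_api_py; infer_instance
def pvWitness_is_interesting_api_py : (List (String × String)) := [("url", "https://example.com/api/items")]

def Spec_is_interesting_api_py (call : List (String × String)) (out : Bool) : Prop := out = is_interesting_api_py_alt call
instance (call : List (String × String)) (out : Bool) : Decidable (Spec_is_interesting_api_py call out) := by unfold Spec_is_interesting_api_py; infer_instance

-- ===== CLAIM (what is proved, stated in full; the proofs are below) =====
def Claim_equal_is_interesting_api_py : Prop := ∀ (call : List (String × String)), Dom_is_interesting_api_py call → Pre_is_interesting_api_py call → Spec_is_interesting_api_py call (is_interesting_api_py call)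

-- ===== LEMMAS AND PROOFS =====

-- every noise pattern is nonempty
theorem noisePatternsB_ne_nil : ∀ p ∈ noisePatternsB, p ≠ [] := by decide

theorem noisePatternsB_eq : noisePatternsB = noisePatternsA.map String.toList := by decide

-- the single scan returns true iff no pattern occurs as an infix
theorem scanNoise_eq_true_iff (cs : List Char) :
    scanNoise cs = true ↔ ∀ p ∈ noisePatternsB, ¬ p <:+: cs := by
  induction cs with
  | nil =>
    simp only [scanNoise, true_iff]
    intro p hp hinf
    exact noisePatternsB_ne_nil p hp (List.eq_nil_of_infix_nil hinf)
  | cons c rest ih =>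
    simp only [scanNoise]
    split_ifs with h
    · simp only [false_iff, not_forall]
      rcases List.any_eq_true.mp h with ⟨p, hp, hpre⟩
      refine ⟨p, hp, ?_⟩
      simp only [not_not]
      exact List.IsPrefix.isInfix (List.isPrefixOf_iff_prefix.mp hpre)
    · rw [ih]
      constructor
      · intro hall p hp hinf
        rcases List.infix_cons_iff.mp hinf with hpre | hsuf
        · rw [List.any_eq_true] at h
          exact h ⟨p, hp, List.isPrefixOf_iff_prefix.mpr hpre⟩
        · exact hall p hp hsuf
      · intro hall p hp hinf
        exact hall p hp (hinf.trans (List.suffix_cons c rest).isInfix)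

theorem scan_eq_not_any (cs : List Char) :
    scanNoise cs = !(noisePatternsA.any (fun p => PySem.Chars.isIn p.toList cs)) := by
  rcases h : scanNoise cs with _ | _
  · have := (scanNoise_eq_true_iff cs).not.mp (by simp [h])
    simp only [not_forall, not_not] at this
    rcases this with ⟨p, hp, hinf⟩
    rw [noisePatternsB_eq] at hp
    rcases List.mem_map.mp hp with ⟨q, hq, rfl⟩
    symm
    simp only [Bool.not_eq_eq_eq_not] at *
    exact List.any_eq_true.mpr ⟨q, hq, (PySem.Chars.isIn_iff_infix _ _).mpr hinf⟩
  · have hall := (scanNoise_eq_true_iff cs).mp h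
    symm
    rw [Bool.not_eq_true', List.any_eq_false]
    intro q hq
    rw [Bool.not_eq_true, PySem.Chars.isIn_eq_false_iff]
    exact hall q.toList (noisePatternsB_eq ▸ List.mem_map_of_mem hq)

-- ===== VERDICT (by name: the statement is the Claim_ definition above) =====
theorem is_interesting_api_py_spec : Claim_equal_is_interesting_api_py := by
  intro call _ _
  unfold Spec_is_interesting_api_py is_interesting_api_py is_interesting_api_py_alt
  cases h : (PySem.Dict.mk call).get? "url" with
  | none => rfl
  | some u =>
    simp [scan_eq_not_any, PySem.Str.lower]
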